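-- pv_equiv track=rewrite | github.com/aarrwnh/advent_of_code | python/2022/day01.py | compute
-- ===== SOURCE A (Python) =====
-- def compute(lines: list[str]) -> list[int]:
--     calories: list[int] = []
--     idx = 0
--     prev = 0
--     while idx < len(lines):
--         if lines[idx] == "":
--             calories.append(sum([int(x) for x in lines[prev:idx]]))
--             prev = idx + 1
--         idx += 1
--     return sorted(calories)
-- ===== SOURCE B (Python) =====
-- def compute(lines: list[str]) -> list[int]:
--     bounds = [-1] + [i for i, l in enumerate(lines) if l == ""]
--     return sorted(sum(int(x) for x in lines[a + 1:b])
--                   for a, b in zip(bounds, bounds[1:]))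
-- ===== Notes on version B (the rewrite author's own statement) =====
-- stated objective: alternative
-- what changed: Replaces the index/prev while-loop with running accumulator state by a two-phase decomposition: first collect the blank-line boundary indices, then map consecutive boundary pairs to slice sums.
import Mathlib
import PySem

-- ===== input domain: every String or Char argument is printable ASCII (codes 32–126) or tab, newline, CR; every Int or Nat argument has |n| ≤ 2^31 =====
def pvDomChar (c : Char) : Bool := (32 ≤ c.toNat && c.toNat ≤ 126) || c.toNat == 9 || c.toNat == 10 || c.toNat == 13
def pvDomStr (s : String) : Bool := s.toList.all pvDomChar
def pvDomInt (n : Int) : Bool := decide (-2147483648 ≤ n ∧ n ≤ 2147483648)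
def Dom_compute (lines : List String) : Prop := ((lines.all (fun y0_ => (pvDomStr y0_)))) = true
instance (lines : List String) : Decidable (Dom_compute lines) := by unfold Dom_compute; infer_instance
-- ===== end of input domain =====

-- B restructures A (boundary indices first, then slice sums) — same cost, different decomposition.

-- int(x); exact wherever Python's int() succeeds (Pre_ admits only such inputs)
def pvInt (s : String) : Int := (PySem.Int.ofStr? s).getD 0

-- ===== PORT A =====
-- the while loop; fuel counts the remaining iterations (len - idx)
def computeLoop (lines : List String) : Nat → Nat → Nat → List Int → List Int
  | 0, _, _, cal => cal
  | fuel + 1, idx, prev, cal =>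
    if lines.getD idx "" = "" then
      computeLoop lines fuel (idx + 1) (idx + 1)
        (cal ++ [((PySem.List.slice lines (some (prev : Int)) (some (idx : Int))).map pvInt).sum])
    else
      computeLoop lines fuel (idx + 1) prev cal

def compute (lines : List String) : List Int :=
  PySem.List.sorted (computeLoop lines lines.length 0 0 []) (fun x => x) false

-- ===== PORT B =====
def compute_alt (lines : List String) : List Int :=
  let bounds : List Int :=
    (-1) :: ((PySem.List.enumerate lines).filter (fun p => p.2 == "")).map (fun p => p.1)
  PySem.List.sorted
    ((bounds.zip bounds.tail).map
      (fun p => ((PySem.List.slice lines (some (p.1 + 1)) (some p.2)).map pvInt).sum))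
    (fun x => x) false

-- ===== PRECONDITION & SPEC =====
-- Pre_ excludes exactly the inputs where Python A raises ValueError: a non-blank line that
-- precedes some blank line (hence is fed to int()) but is not int-parsable.
def Pre_compute (lines : List String) : Prop :=
  ∀ i ∈ List.range lines.length, ∀ j ∈ List.range lines.length,
    i < j → lines.getD j "" = "" →
      (lines.getD i "" = "" ∨ (PySem.Int.ofStr? (lines.getD i "")).isSome = true)
instance (lines : List String) : Decidable (Pre_compute lines) := by unfold Pre_compute; infer_instance

def pvWitness_compute : List String := ["1", "2", "", " 3 ", "", "x"]

def Spec_compute (lines : List String) (out : List Int) : Prop := out = compute_alt lines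
instance (lines : List String) (out : List Int) : Decidable (Spec_compute lines out) := by unfold Spec_compute; infer_instance

-- ===== CLAIM (what is proved, stated in full; the proofs are below) =====
def Claim_equal_compute : Prop := ∀ (lines : List String), Dom_compute lines → Pre_compute lines → Spec_compute lines (compute lines)

-- ===== LEMMAS AND PROOFS =====

-- indices ≥ s (in absolute numbering) of the blank lines of the given suffix
def blanksAux : List String → Nat → List Nat
  | [], _ => []
  | l :: rest, s => if l = "" then s :: blanksAux rest (s + 1) else blanksAux rest (s + 1)

-- the group sums, one per blank index, groups starting at prev
def gsum (lines : List String) : Nat → List Nat → List Int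
  | _, [] => []
  | prev, j :: rest =>
      (((lines.drop prev).take (j - prev)).map pvInt).sum :: gsum lines (j + 1) rest

theorem computeLoop_eq (lines : List String) :
    ∀ (fuel idx prev : Nat) (cal : List Int), fuel = lines.length - idx →
      computeLoop lines fuel idx prev cal = cal ++ gsum lines prev (blanksAux (lines.drop idx) idx) := by
  intro fuel
  induction fuel with
  | zero =>
      intro idx prev cal h
      have hle : lines.length ≤ idx := by omega
      simp [computeLoop, List.drop_eq_nil_of_le hle, blanksAux, gsum]
  | succ f ih =>
      intro idx prev cal h
      have hlt : idx < lines.length := by omega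
      have hdrop : lines.drop idx = lines[idx] :: lines.drop (idx + 1) :=
        List.drop_eq_getElem_cons hlt
      have hgetD : lines.getD idx "" = lines[idx] := by
        simp [List.getD, List.getElem?_eq_getElem hlt]
      by_cases hb : lines[idx] = ""
      · simp only [computeLoop, hgetD, if_pos hb]
        rw [ih (idx + 1) (idx + 1) _ (by omega)]
        rw [hdrop]
        simp [blanksAux, hb, gsum, PySem.List.slice_natCast]
      · simp only [computeLoop, hgetD, if_neg hb]
        rw [ih (idx + 1) prev cal (by omega)]
        rw [hdrop]
        simp [blanksAux, hb]

theorem enum_filter_eq (lines : List String) :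
    ∀ (s : Nat),
      ((PySem.List.enumerate lines (s : Int)).filter (fun p => p.2 == "")).map (fun p => p.1)
        = (blanksAux lines s).map (fun (j : Nat) => (j : Int)) := by
  induction lines with
  | nil => intro s; simp [PySem.List.enumerate_nil, blanksAux]
  | cons l rest ih =>
      intro s
      rw [PySem.List.enumerate_cons]
      by_cases hb : l = ""
      · have := ih (s + 1)
        simp [blanksAux, hb]
        rw [show ((s : Int) + 1) = ((s + 1 : Nat) : Int) by push_cast; ring, this]
      · have := ih (s + 1)
        simp [blanksAux, hb]
        rw [show ((s : Int) + 1) = ((s + 1 : Nat) : Int) by push_cast; ring, this]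

theorem zip_map_eq_gsum (lines : List String) :
    ∀ (js : List Nat) (prev : Nat),
      (((((prev : Int) - 1) :: js.map (fun (j : Nat) => (j : Int))).zip (js.map (fun (j : Nat) => (j : Int)))).map
          (fun p => ((PySem.List.slice lines (some (p.1 + 1)) (some p.2)).map pvInt).sum))
        = gsum lines prev js := by
  intro js
  induction js with
  | nil => intro prev; simp [gsum]
  | cons j rest ih =>
      intro prev
      simp only [List.map_cons, List.zip_cons_cons, gsum]
      congr 1
      · rw [show ((prev : Int) - 1 + 1) = ((prev : Nat) : Int) by ring]
        rw [PySem.List.slice_natCast]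
      · have := ih (j + 1)
        rw [show ((j : Int)) = (((j + 1 : Nat) : Int) - 1) by push_cast; ring] at *
        exact this

theorem compute_eq_sorted (lines : List String) :
    compute lines = PySem.List.sorted (gsum lines 0 (blanksAux lines 0)) (fun x => x) false := by
  unfold compute
  rw [computeLoop_eq lines lines.length 0 0 [] (by omega)]
  simp

theorem compute_alt_eq_sorted (lines : List String) :
    compute_alt lines = PySem.List.sorted (gsum lines 0 (blanksAux lines 0)) (fun x => x) false := by
  unfold compute_alt
  have h1 := enum_filter_eq lines 0
  simp only [Nat.cast_zero] at h1
  have h2 := zip_map_eq_gsum lines (blanksAux lines 0) 0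
  simp only [Nat.cast_zero, zero_sub] at h2
  simp only [h1, List.tail_cons]
  rw [h2]

-- ===== VERDICT (by name: the statement is the Claim_ definition above) =====
theorem compute_spec : Claim_equal_compute := by
  intro lines _ _
  unfold Spec_compute
  rw [compute_eq_sorted, compute_alt_eq_sorted]
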